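-- pv_equiv track=rewrite | github.com/amugra/ugv-battery-model | data-processing/analyse-dcir.py | find_first_quasi_stable_triplet
-- ===== SOURCE A (Python) =====
-- from typing import Iterable, List, Optional
--
-- def find_first_quasi_stable_triplet(
--     decimals: List[int],
--     pulse_start: int,
--     stable_window: int,
--     stable_tol: int,
-- ) -> Optional[int]:
--     start = pulse_start
--     end = len(decimals) - stable_window + 1
--
--     for i in range(start, end):
--         window = decimals[i:i + stable_window]
--         if max(window) - min(window) <= stable_tol:
--             return i - pulse_start
--
--     return None
-- ===== SOURCE B (Python) =====
-- from typing import List, Optional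
--
--
-- def find_first_quasi_stable_triplet(
--     decimals: List[int],
--     pulse_start: int,
--     stable_window: int,
--     stable_tol: int,
-- ) -> Optional[int]:
--     # Sliding-window min/max queue built from two stacks whose entries carry
--     # running (max, min) aggregates; each element is pushed/popped O(1) times.
--     n = len(decimals)
--     back: List[tuple] = []   # entries (value, running_max, running_min); top = last
--     front: List[tuple] = []
--
--     def push(stack: List[tuple], v: int) -> None:
--         if stack:
--             _, mx, mn = stack[-1]
--             stack.append((v, v if v > mx else mx, v if v < mn else mn))
--         else:
--             stack.append((v, v, v))
--
--     for j in range(pulse_start, n):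
--         push(back, decimals[j])
--         if j - pulse_start >= stable_window - 1:
--             # queue now holds the window starting at i
--             i = j - stable_window + 1
--             _, bmx, bmn = back[-1]
--             if front:
--                 _, fmx, fmn = front[-1]
--                 mx = bmx if bmx > fmx else fmx
--                 mn = bmn if bmn < fmn else fmn
--             else:
--                 mx, mn = bmx, bmn
--             if mx - mn <= stable_tol:
--                 return i - pulse_start
--             # slide: drop the queue's front element
--             if not front:
--                 while back:
--                     v, _, _ = back.pop()
--                     push(front, v)
--             front.pop()
--     return None
-- ===== Notes on version B (the rewrite author's own statement) =====
-- stated objective: alternative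
-- what changed: Replaces the per-window slice with two separate max()/min() scans by a sliding-window min/max queue built from two stacks carrying running (max,min) aggregates, checked incrementally in one pass.
-- outside the precondition, e.g. on find_first_quasi_stable_triplet([1, 2, 3], -1, 4, 0): A returns 0, B returns None; on find_first_quasi_stable_triplet([1], -5, 9, 0): A returns None, B raises IndexError
import Mathlib
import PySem

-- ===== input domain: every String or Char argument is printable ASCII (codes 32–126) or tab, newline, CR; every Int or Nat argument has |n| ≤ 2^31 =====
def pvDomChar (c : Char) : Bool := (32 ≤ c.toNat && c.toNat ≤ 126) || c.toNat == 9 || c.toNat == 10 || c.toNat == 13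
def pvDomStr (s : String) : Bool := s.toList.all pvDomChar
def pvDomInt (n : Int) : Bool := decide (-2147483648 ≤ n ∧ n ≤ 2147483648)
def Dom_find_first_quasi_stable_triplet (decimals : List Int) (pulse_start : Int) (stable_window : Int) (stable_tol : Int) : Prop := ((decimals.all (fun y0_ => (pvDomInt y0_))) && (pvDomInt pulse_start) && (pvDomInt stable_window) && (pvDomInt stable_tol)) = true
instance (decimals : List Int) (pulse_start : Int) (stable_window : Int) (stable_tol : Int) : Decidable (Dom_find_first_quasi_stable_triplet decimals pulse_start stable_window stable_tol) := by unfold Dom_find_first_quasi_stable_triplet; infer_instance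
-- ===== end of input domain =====

-- B replaces A's per-window slice + max()/min() rescans by a sliding-window min/max
-- queue made of two stacks carrying running (max,min) aggregates (a different algorithm).

-- ===== PORT A =====
-- the for-loop of A, one step per remaining index i of range(start, end)
def ffqstLoopA (decimals : List Int) (pulse_start : Int) (stable_window : Int) (stable_tol : Int) : List Int → Option Int
  | [] => none
  | i :: rest =>
    let window := PySem.List.slice decimals (some i) (some (i + stable_window))
    match PySem.List.max? window (fun x => x), PySem.List.min? window (fun x => x) with
    | some mx, some mn =>
      if mx - mn ≤ stable_tol then some (i - pulse_start)
      else ffqstLoopA decimals pulse_start stable_window stable_tol rest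
    | _, _ => none   -- empty window: Python's max() raises ValueError; excluded by Pre_

def find_first_quasi_stable_triplet (decimals : List Int) (pulse_start : Int) (stable_window : Int) (stable_tol : Int) : Option Int :=
  let start := pulse_start
  let end_ := (decimals.length : Int) - stable_window + 1
  ffqstLoopA decimals pulse_start stable_window stable_tol (PySem.List.pyRange start end_ 1)

-- ===== PORT B =====
-- a stack entry is (value, running max, running min); head of the list = top of the stack
def altPush (st : List (Int × Int × Int)) (v : Int) : List (Int × Int × Int) :=
  match st with
  | [] => [(v, v, v)]
  | (_, mx, mn) :: _ => (v, if v > mx then v else mx, if v < mn then v else mn) :: st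

-- the for-loop of Source B; fuel = number of remaining indices j of range(pulse_start, n)
def altLoop (decimals : List Int) (pulse_start : Int) (stable_window : Int) (stable_tol : Int)
    (j : Int) (back front : List (Int × Int × Int)) : Nat → Option Int
  | 0 => none
  | fuel + 1 =>
    -- decimals[j]: in-range inside Pre_; out of range only outside the claim
    let back' := altPush back (PySem.List.pyGetD decimals j 0)
    if j - pulse_start ≥ stable_window - 1 then
      let i := j - stable_window + 1
      let bagg := match back' with
        | (_, mx, mn) :: _ => (mx, mn)
        | [] => (0, 0)
      let agg := match front with
        | (_, fmx, fmn) :: _ =>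
            ((if bagg.1 > fmx then bagg.1 else fmx), (if bagg.2 < fmn then bagg.2 else fmn))
        | [] => bagg
      if agg.1 - agg.2 ≤ stable_tol then some (i - pulse_start)
      else
        match front with
        | [] =>
          let front' := back'.foldl (fun f e => altPush f e.1) []
          altLoop decimals pulse_start stable_window stable_tol (j + 1) [] front'.tail fuel
        | _ :: ftail =>
          altLoop decimals pulse_start stable_window stable_tol (j + 1) back' ftail fuel
    else
      altLoop decimals pulse_start stable_window stable_tol (j + 1) back' front fuel

def find_first_quasi_stable_triplet_alt (decimals : List Int) (pulse_start : Int) (stable_window : Int) (stable_tol : Int) : Option Int :=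
  altLoop decimals pulse_start stable_window stable_tol pulse_start [] []
    ((decimals.length : Int) - pulse_start).toNat

-- ===== PRECONDITION & SPEC =====
-- Pre_ excludes stable_window < 1 whenever A's loop runs (Python's max() raises
-- ValueError on the empty slice there), and pulse_start < 0 except where the loop is
-- empty and in range: A's values on negative pulse_start come from Python's
-- negative-index/slice wraparound, an accident of A's slicing B does not follow.
def Pre_find_first_quasi_stable_triplet (decimals : List Int) (pulse_start : Int) (stable_window : Int) (stable_tol : Int) : Prop :=
  (0 ≤ pulse_start ∧ 1 ≤ stable_window) ∨
    ((decimals.length : Int) - stable_window + 1 ≤ pulse_start ∧ -(decimals.length : Int) ≤ pulse_start)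

instance (decimals : List Int) (pulse_start : Int) (stable_window : Int) (stable_tol : Int) : Decidable (Pre_find_first_quasi_stable_triplet decimals pulse_start stable_window stable_tol) := by unfold Pre_find_first_quasi_stable_triplet; infer_instance

def pvWitness_find_first_quasi_stable_triplet : List Int × Int × Int × Int := ([5, 0, 1, 1, 9], 1, 2, 1)

def Spec_find_first_quasi_stable_triplet (decimals : List Int) (pulse_start : Int) (stable_window : Int) (stable_tol : Int) (out : Option Int) : Prop := out = find_first_quasi_stable_triplet_alt decimals pulse_start stable_window stable_tol
instance (decimals : List Int) (pulse_start : Int) (stable_window : Int) (stable_tol : Int) (out : Option Int) : Decidable (Spec_find_first_quasi_stable_triplet decimals pulse_start stable_window stable_tol out) := by unfold Spec_find_first_quasi_stable_triplet; infer_instance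

-- ===== CLAIM (what is proved, stated in full; the proofs are below) =====
def Claim_equal_find_first_quasi_stable_triplet : Prop := ∀ (decimals : List Int) (pulse_start : Int) (stable_window : Int) (stable_tol : Int), Dom_find_first_quasi_stable_triplet decimals pulse_start stable_window stable_tol → Pre_find_first_quasi_stable_triplet decimals pulse_start stable_window stable_tol → Spec_find_first_quasi_stable_triplet decimals pulse_start stable_window stable_tol (find_first_quasi_stable_triplet decimals pulse_start stable_window stable_tol)


-- ===== LEMMAS AND PROOFS =====

-- max / min of a nonempty list, in the shape PySem.List.max?_id_cons produces
def fmMax : List Int → Int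
  | [] => 0
  | x :: t => t.foldl max x

def fmMin : List Int → Int
  | [] => 0
  | x :: t => t.foldl min x

-- a stack built by pushing the values of vs in order
def stackOf (vs : List Int) : List (Int × Int × Int) := vs.foldl altPush []

theorem foldl_max_hoist (t : List Int) : ∀ a b : Int, t.foldl max (max a b) = max a (t.foldl max b) := by
  induction t with
  | nil => intro a b; rfl
  | cons c t ih => intro a b; simp only [List.foldl_cons, max_assoc, ih]

theorem foldl_min_hoist (t : List Int) : ∀ a b : Int, t.foldl min (min a b) = min a (t.foldl min b) := by
  induction t with
  | nil => intro a b; rfl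
  | cons c t ih => intro a b; simp only [List.foldl_cons, min_assoc, ih]

theorem fmMax_concat (l : List Int) (u : Int) (h : l ≠ []) : fmMax (l ++ [u]) = max (fmMax l) u := by
  obtain ⟨x, t, rfl⟩ := List.exists_cons_of_ne_nil h
  simp only [fmMax, List.cons_append, List.foldl_append, List.foldl_cons, List.foldl_nil]

theorem fmMin_concat (l : List Int) (u : Int) (h : l ≠ []) : fmMin (l ++ [u]) = min (fmMin l) u := by
  obtain ⟨x, t, rfl⟩ := List.exists_cons_of_ne_nil h
  simp only [fmMin, List.cons_append, List.foldl_append, List.foldl_cons, List.foldl_nil]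

theorem fmMax_append (l1 l2 : List Int) (h1 : l1 ≠ []) (h2 : l2 ≠ []) :
    fmMax (l1 ++ l2) = max (fmMax l1) (fmMax l2) := by
  obtain ⟨x, t, rfl⟩ := List.exists_cons_of_ne_nil h1
  obtain ⟨y, s, rfl⟩ := List.exists_cons_of_ne_nil h2
  simp only [fmMax, List.cons_append, List.foldl_cons, List.foldl_append]
  rw [← foldl_max_hoist, max_comm (t.foldl max x) y]

theorem fmMin_append (l1 l2 : List Int) (h1 : l1 ≠ []) (h2 : l2 ≠ []) :
    fmMin (l1 ++ l2) = min (fmMin l1) (fmMin l2) := by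
  obtain ⟨x, t, rfl⟩ := List.exists_cons_of_ne_nil h1
  obtain ⟨y, s, rfl⟩ := List.exists_cons_of_ne_nil h2
  simp only [fmMin, List.cons_append, List.foldl_cons, List.foldl_append]
  rw [← foldl_min_hoist, min_comm (t.foldl min x) y]

theorem fmMax_reverse (l : List Int) : fmMax l.reverse = fmMax l := by
  induction l with
  | nil => rfl
  | cons x t ih =>
    cases t with
    | nil => rfl
    | cons y s =>
      rw [List.reverse_cons, fmMax_concat _ _ (by simp), ih]
      show max (s.foldl max y) x = s.foldl max (max x y)
      rw [foldl_max_hoist]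
      exact max_comm _ _

theorem fmMin_reverse (l : List Int) : fmMin l.reverse = fmMin l := by
  induction l with
  | nil => rfl
  | cons x t ih =>
    cases t with
    | nil => rfl
    | cons y s =>
      rw [List.reverse_cons, fmMin_concat _ _ (by simp), ih]
      show min (s.foldl min y) x = s.foldl min (min x y)
      rw [foldl_min_hoist]
      exact min_comm _ _

theorem stackOf_push (vs : List Int) (v : Int) : stackOf (vs ++ [v]) = altPush (stackOf vs) v := by
  simp [stackOf, List.foldl_append]

-- the shape of a nonempty stack: top value is the last pushed, aggregates are max/min so far

-- the shape of a nonempty stack: top value is the last pushed, aggregates are max/min so far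
theorem stackOf_concat (us : List Int) : ∀ u : Int,
    stackOf (us ++ [u]) = (u, fmMax (us ++ [u]), fmMin (us ++ [u])) :: stackOf us := by
  induction us using List.reverseRecOn with
  | nil => intro u; rfl
  | append_singleton ts t ih =>
    intro u
    have hne : ts ++ [t] ≠ [] := by simp
    have hmax : (if u > fmMax (ts ++ [t]) then u else fmMax (ts ++ [t])) = max (fmMax (ts ++ [t])) u := by
      rw [max_def]; split_ifs <;> omega
    have hmin : (if u < fmMin (ts ++ [t]) then u else fmMin (ts ++ [t])) = min (fmMin (ts ++ [t])) u := by
      rw [min_def]; split_ifs <;> omega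
    rw [stackOf_push, ih t]
    show (u, _, _) :: _ = _
    rw [hmax, hmin, fmMax_concat _ _ hne, fmMin_concat _ _ hne, ← ih t]

theorem stackOf_map_fst (vs : List Int) : (stackOf vs).map (·.1) = vs.reverse := by
  induction vs using List.reverseRecOn with
  | nil => rfl
  | append_singleton us u ih => rw [stackOf_concat]; simp [ih]

theorem take_succ_concat (l : List Int) (n : Nat) (h : n < l.length) :
    l.take (n+1) = l.take n ++ [l[n]] := by
  rw [List.take_add_one, List.getElem?_eq_getElem h]; rfl

theorem tail_take (l : List Int) (n : Nat) : (l.take (n+1)).tail = l.tail.take n := by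
  cases l <;> simp

theorem eq_nil_or_append_singleton (l : List Int) : l = [] ∨ ∃ us u, l = us ++ [u] := by
  rcases List.eq_nil_or_concat l with h | ⟨L, b, h⟩
  · exact Or.inl h
  · exact Or.inr ⟨L, b, by simpa using h⟩

-- the window of the next step: right end of the current one plus the freshly read element
theorem window_tail (decimals : List Int) (a k : Nat) :
    ((decimals.drop a).take (k+1)).tail = (decimals.drop (a+1)).take k := by
  rw [tail_take, List.tail_drop]

-- B's main phase (window already full) computes A's remaining loop
theorem main_loop_eq (decimals : List Int) (ps w tol : Int) (hps : 0 ≤ ps) (hw : 1 ≤ w) :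
    ∀ fuel : Nat, ∀ i : Int, ∀ fs bs : List Int,
    ps ≤ i →
    i + w - 1 + (fuel : Int) = decimals.length →
    fs.reverse ++ bs = (decimals.drop i.toNat).take (w - 1).toNat →
    altLoop decimals ps w tol (i + w - 1) (stackOf bs) (stackOf fs) fuel
      = ffqstLoopA decimals ps w tol (PySem.List.pyRange i ((decimals.length : Int) - w + 1) 1) := by
  intro fuel
  induction fuel with
  | zero =>
    intro i fs bs hi hfuel hq
    rw [PySem.List.pyRange_one_eq_nil (by omega)]
    rfl
  | succ fuel ih =>
    intro i fs bs hi hfuel hq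
    have hjn : i + w - 1 < (decimals.length : Int) := by omega
    have hj0 : 0 ≤ i + w - 1 := by omega
    have hi0 : 0 ≤ i := by omega
    have hak : i.toNat + (w - 1).toNat < decimals.length := by omega
    have hget : PySem.List.pyGetD decimals (i + w - 1) 0 = decimals[(i + w - 1).toNat]'(by omega) :=
      PySem.List.pyGetD_eq_getElem _ _ hj0 (by exact_mod_cast hjn)
    set dj := decimals[(i + w - 1).toNat]'(by omega) with hdj
    -- the full window of A's step i, as drop/take
    have hWdt : fs.reverse ++ (bs ++ [dj]) = (decimals.drop i.toNat).take ((w - 1).toNat + 1) := by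
      have hidx : i.toNat + (w - 1).toNat = (i + w - 1).toNat := by omega
      rw [← List.append_assoc, hq, take_succ_concat _ _ (by simp; omega), List.getElem_drop]
      simp only [hidx, hdj]
    set W := fs.reverse ++ (bs ++ [dj]) with hWdef
    have hWne : W ≠ [] := by
      intro h
      have : W.length = 0 := by rw [h]; rfl
      rw [hWdt] at this
      simp at this
      omega
    obtain ⟨x, t, hxt⟩ := List.exists_cons_of_ne_nil hWne
    have hWfm : fmMax W = t.foldl max x := by rw [hxt]; rfl
    have hWfmin : fmMin W = t.foldl min x := by rw [hxt]; rfl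
    -- A's slice is this window
    have hslice : PySem.List.slice decimals (some i) (some (i + w)) = W := by
      rw [PySem.List.slice_toNat decimals hi0 (by omega), hWdt]
      congr 1
      omega
    -- A's step
    have hA : ffqstLoopA decimals ps w tol (PySem.List.pyRange i ((decimals.length : Int) - w + 1) 1)
        = if fmMax W - fmMin W ≤ tol then some (i - ps)
          else ffqstLoopA decimals ps w tol (PySem.List.pyRange (i+1) ((decimals.length : Int) - w + 1) 1) := by
      rw [PySem.List.pyRange_one_cons (by omega)]
      show ffqstLoopA decimals ps w tol (i :: _) = _
      rw [ffqstLoopA, hslice, hxt, PySem.List.max?_id_cons, PySem.List.min?_id_cons]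
      simp only [fmMax, fmMin]
      rfl
    rw [hA]
    -- B's step
    show altLoop decimals ps w tol (i + w - 1) (stackOf bs) (stackOf fs) (fuel + 1) = _
    simp only [altLoop]
    rw [hget, ← stackOf_push, stackOf_concat bs dj, if_pos (show i + w - 1 - ps ≥ w - 1 by omega)]
    rcases eq_nil_or_append_singleton fs with hfs | ⟨us, u, hfs⟩
    · -- empty front stack: window is exactly the back stack's values
      subst hfs
      have hWbs : W = bs ++ [dj] := by simp [hWdef]
      show (if fmMax (bs ++ [dj]) - fmMin (bs ++ [dj]) ≤ tol
            then some (i + w - 1 - w + 1 - ps)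
            else _) = _
      rw [← hWbs, show i + w - 1 - w + 1 = i by ring]
      by_cases htol : fmMax W - fmMin W ≤ tol
      · rw [if_pos htol, if_pos htol]
      · rw [if_neg htol, if_neg htol]
        -- transfer the back stack, then pop the queue's front element
        have htrans : ((dj, fmMax W, fmMin W) :: stackOf bs).foldl
            (fun f e => altPush f e.1) [] = stackOf (W.reverse) := by
          rw [hWbs, ← stackOf_concat bs dj, show ((stackOf (bs ++ [dj])).foldl (fun f e => altPush f e.1) [])
              = ((stackOf (bs ++ [dj])).map (·.1)).foldl altPush [] from (List.foldl_map ..).symm,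
            stackOf_map_fst]
          rfl
        rw [htrans]
        have hrev : W.reverse = t.reverse ++ [x] := by rw [hxt]; simp
        rw [hrev, stackOf_concat t.reverse x]
        show altLoop decimals ps w tol (i + w - 1 + 1) (stackOf []) (stackOf t.reverse) fuel = _
        rw [show i + w - 1 + 1 = (i + 1) + w - 1 by ring]
        rw [ih (i+1) t.reverse []]
        · omega
        · omega
        · -- queue invariant for the shifted window
          have : t = ((decimals.drop i.toNat).take ((w-1).toNat + 1)).tail := by
            rw [← hWdt, hxt]; rfl
          rw [this, window_tail decimals i.toNat ((w-1).toNat)]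
          simp only [List.reverse_reverse, List.append_nil]
          rw [show ((i:Int) + 1).toNat = i.toNat + 1 from by omega]
    · -- nonempty front stack
      subst hfs
      rw [stackOf_concat us u]
      have hfne : (us ++ [u]).reverse ≠ [] := by simp
      have hbne : bs ++ [dj] ≠ [] := by simp
      have hcomb : (if fmMax (bs ++ [dj]) > fmMax (us ++ [u]) then fmMax (bs ++ [dj]) else fmMax (us ++ [u]))
          = fmMax W := by
        rw [hWdef, fmMax_append _ _ hfne hbne, fmMax_reverse, max_def]
        split_ifs <;> omega
      have hcombm : (if fmMin (bs ++ [dj]) < fmMin (us ++ [u]) then fmMin (bs ++ [dj]) else fmMin (us ++ [u]))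
          = fmMin W := by
        rw [hWdef, fmMin_append _ _ hfne hbne, fmMin_reverse, min_def]
        split_ifs <;> omega
      show (if (if fmMax (bs ++ [dj]) > fmMax (us ++ [u]) then fmMax (bs ++ [dj]) else fmMax (us ++ [u]))
              - (if fmMin (bs ++ [dj]) < fmMin (us ++ [u]) then fmMin (bs ++ [dj]) else fmMin (us ++ [u])) ≤ tol
            then some (i + w - 1 - w + 1 - ps)
            else _) = _
      rw [hcomb, hcombm, show i + w - 1 - w + 1 = i by ring]
      by_cases htol : fmMax W - fmMin W ≤ tol
      · rw [if_pos htol, if_pos htol]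
      · rw [if_neg htol, if_neg htol]
        rw [← stackOf_concat bs dj]
        show altLoop decimals ps w tol (i + w - 1 + 1) (stackOf (bs ++ [dj])) (stackOf us) fuel = _
        rw [show i + w - 1 + 1 = (i + 1) + w - 1 by ring]
        rw [ih (i+1) us (bs ++ [dj])]
        · omega
        · omega
        · -- queue invariant: drop the window's first element u
          have hWcons : W = u :: (us.reverse ++ (bs ++ [dj])) := by
            rw [hWdef]; simp
          have : us.reverse ++ (bs ++ [dj]) = ((decimals.drop i.toNat).take ((w-1).toNat + 1)).tail := by
            rw [← hWdt, hWcons]; rfl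
          rw [this, window_tail decimals i.toNat ((w-1).toNat)]
          rw [show ((i:Int) + 1).toNat = i.toNat + 1 from by omega]

-- when A's loop is empty, B's window never completes and it also returns None
theorem altLoop_none (decimals : List Int) (ps w tol : Int) :
    ∀ fuel : Nat, ∀ (j : Int), ∀ back front : List (Int × Int × Int),
    j + (fuel : Int) < ps + w →
    altLoop decimals ps w tol j back front fuel = none := by
  intro fuel
  induction fuel with
  | zero => intros; rfl
  | succ fuel ih =>
    intro j back front h
    show altLoop decimals ps w tol j back front (fuel + 1) = none
    simp only [altLoop]
    rw [if_neg (by omega)]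
    exact ih (j+1) _ _ (by omega)

-- B's fill phase (first stable_window - 1 pushes) leaves A's loop untouched
theorem fill_loop_eq (decimals : List Int) (ps w tol : Int) (hps : 0 ≤ ps) (hw : 1 ≤ w) :
    ∀ fuel : Nat, ∀ j : Int, ∀ bs : List Int,
    ps ≤ j → j ≤ ps + w - 1 → j + (fuel : Int) = decimals.length →
    bs = (decimals.drop ps.toNat).take (j - ps).toNat →
    altLoop decimals ps w tol j (stackOf bs) [] fuel
      = ffqstLoopA decimals ps w tol (PySem.List.pyRange ps ((decimals.length : Int) - w + 1) 1) := by
  intro fuel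
  induction fuel with
  | zero =>
    intro j bs hj1 hj2 hfuel hbs
    by_cases hj : j = ps + w - 1
    · subst hj
      refine main_loop_eq decimals ps w tol hps hw 0 ps [] bs le_rfl ?_ ?_
      · omega
      · rw [hbs]
        simp only [List.reverse_nil, List.nil_append]
        congr 1
        omega
    · rw [PySem.List.pyRange_one_eq_nil (by omega)]
      rfl
  | succ fuel ih =>
    intro j bs hj1 hj2 hfuel hbs
    by_cases hj : j = ps + w - 1
    · subst hj
      refine main_loop_eq decimals ps w tol hps hw (fuel+1) ps [] bs le_rfl ?_ ?_
      · omega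
      · rw [hbs]
        simp only [List.reverse_nil, List.nil_append]
        congr 1
        omega
    · have hjn : j < (decimals.length : Int) := by omega
      have hget : PySem.List.pyGetD decimals j 0 = decimals[j.toNat]'(by omega) :=
        PySem.List.pyGetD_eq_getElem _ _ (by omega) (by exact_mod_cast hjn)
      show altLoop decimals ps w tol j (stackOf bs) [] (fuel + 1) = _
      rw [altLoop, hget, ← stackOf_push, if_neg (by omega)]
      rw [ih (j+1) (bs ++ [decimals[j.toNat]'(by omega)]) (by omega) (by omega) (by omega)]
      rw [hbs]
      have hsz : (j + 1 - ps).toNat = (j - ps).toNat + 1 := by omega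
      have hidx : ps.toNat + (j - ps).toNat = j.toNat := by omega
      rw [hsz, take_succ_concat _ _ (by simp; omega), List.getElem_drop]
      simp only [hidx]

-- ===== VERDICT (by name: the statement is the Claim_ definition above) =====
theorem find_first_quasi_stable_triplet_spec : Claim_equal_find_first_quasi_stable_triplet := by
  intro decimals ps w tol _ hpre
  unfold Spec_find_first_quasi_stable_triplet
  simp only [find_first_quasi_stable_triplet, find_first_quasi_stable_triplet_alt]
  rcases hpre with ⟨hps, hw⟩ | ⟨hr, hlo⟩
  · by_cases hn : ps ≤ (decimals.length : Int)
    · exact (fill_loop_eq decimals ps w tol hps hw _ ps [] le_rfl (by omega) (by omega) (by simp)).symm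
    · rw [show ((decimals.length : Int) - ps).toNat = 0 by omega,
          PySem.List.pyRange_one_eq_nil (by omega)]
      rfl
  · by_cases hn : ps ≤ (decimals.length : Int)
    · rw [PySem.List.pyRange_one_eq_nil (by omega),
          altLoop_none decimals ps w tol _ ps [] [] (by omega)]
      rfl
    · rw [show ((decimals.length : Int) - ps).toNat = 0 by omega,
          PySem.List.pyRange_one_eq_nil (by omega)]
      rfl
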